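-- pv_equiv track=rewrite | github.com/prasoonvarshney/scientific-entity-recognition | code/model_pipeline/pipeline.py | unalign_labels_by_word_ids
-- ===== SOURCE A (Python) =====
-- def unalign_labels_by_word_ids(labels, word_ids):
--     prev_id = -100
--     padded_word_ids = []
--     for i, word_id in enumerate(word_ids):
--         if prev_id == word_id:
--             padded_word_ids.append(-100)
--         else:
--             padded_word_ids.append(word_id)
--         prev_id = word_id
--
--     assert len(labels) == len(padded_word_ids)
--
--     unaligned_labels = []
--     for label, padded_word_id in zip(labels, padded_word_ids):
--         if padded_word_id != -100:
--             unaligned_labels.append(label)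
--     return unaligned_labels
-- ===== SOURCE B (Python) =====
-- def unalign_labels_by_word_ids(labels, word_ids):
--     assert len(labels) == len(word_ids)
--     return [labels[i] for i in range(len(word_ids))
--             if word_ids[i] != -100 and (i == 0 or word_ids[i] != word_ids[i - 1])]
-- ===== Notes on version B (the rewrite author's own statement) =====
-- stated objective: simpler
-- what changed: Replaces A's stateful mask-building loop plus filter loop with a single stateless index comprehension: keep labels[i] exactly when word_ids[i] != -100 and it differs from word_ids[i-1] (or i == 0); no intermediate padded_word_ids list and no running prev_id accumulator.
import Mathlib
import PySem

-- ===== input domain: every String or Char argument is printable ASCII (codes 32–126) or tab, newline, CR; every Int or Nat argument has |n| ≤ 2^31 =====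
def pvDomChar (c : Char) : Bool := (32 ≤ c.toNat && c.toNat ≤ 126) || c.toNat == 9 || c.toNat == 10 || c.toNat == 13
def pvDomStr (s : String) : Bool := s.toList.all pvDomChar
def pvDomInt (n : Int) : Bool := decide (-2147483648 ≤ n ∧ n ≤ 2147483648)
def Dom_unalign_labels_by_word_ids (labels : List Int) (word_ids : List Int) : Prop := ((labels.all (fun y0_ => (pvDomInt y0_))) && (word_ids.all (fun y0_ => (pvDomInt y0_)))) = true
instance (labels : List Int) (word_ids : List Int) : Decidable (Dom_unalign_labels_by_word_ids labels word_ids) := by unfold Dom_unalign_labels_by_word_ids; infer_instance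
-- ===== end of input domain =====

-- B replaces A's mask-then-filter loops with a stateless index comprehension over adjacent positions (simpler; same O(n) cost).
-- Pre_ excludes mismatched lengths, where both A and B raise AssertionError.


-- ===== PORT A =====
def unalign_labels_by_word_ids (labels : List Int) (word_ids : List Int) : List Int :=
  -- first loop: build padded_word_ids while tracking prev_id
  let st := word_ids.foldl
    (fun (st : Int × List Int) word_id =>
      (word_id, st.2 ++ [if st.1 == word_id then -100 else word_id]))
    (-100, [])
  let padded_word_ids := st.2
  -- (assert len(labels) == len(padded_word_ids): covered by Pre_)
  -- second loop: keep labels whose padded word_id is not -100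
  (labels.zip padded_word_ids).foldl
    (fun acc p => if p.2 != -100 then acc ++ [p.1] else acc) []

-- ===== PORT B =====
def unalign_labels_by_word_ids_alt (labels : List Int) (word_ids : List Int) : List Int :=
  -- (assert: covered by Pre_) index comprehension: filter the indices, then read the labels
  ((List.range word_ids.length).filter (fun i =>
      word_ids.getD i 0 != -100 &&
      (i == 0 || word_ids.getD i 0 != word_ids.getD (i - 1) 0))).map
    (fun i => labels.getD i 0)

-- ===== PRECONDITION & SPEC =====
-- Pre_ excludes exactly the inputs where A's assert fails (AssertionError): mismatched lengths.
def Pre_unalign_labels_by_word_ids (labels : List Int) (word_ids : List Int) : Prop :=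
  labels.length = word_ids.length
instance (labels : List Int) (word_ids : List Int) : Decidable (Pre_unalign_labels_by_word_ids labels word_ids) := by unfold Pre_unalign_labels_by_word_ids; infer_instance
def pvWitness_unalign_labels_by_word_ids : List Int × List Int := ([1, 2, 3], [0, 0, 1])

def Spec_unalign_labels_by_word_ids (labels : List Int) (word_ids : List Int) (out : List Int) : Prop := out = unalign_labels_by_word_ids_alt labels word_ids
instance (labels : List Int) (word_ids : List Int) (out : List Int) : Decidable (Spec_unalign_labels_by_word_ids labels word_ids out) := by unfold Spec_unalign_labels_by_word_ids; infer_instance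

-- ===== CLAIM (what is proved, stated in full; the proofs are below) =====
def Claim_equal_unalign_labels_by_word_ids : Prop := ∀ (labels : List Int) (word_ids : List Int), Dom_unalign_labels_by_word_ids labels word_ids → Pre_unalign_labels_by_word_ids labels word_ids → Spec_unalign_labels_by_word_ids labels word_ids (unalign_labels_by_word_ids labels word_ids)

-- ===== LEMMAS AND PROOFS =====

-- Common recursive characterisation both ports are reduced to.
def goSel : List Int → List Int → Int → List Int
  | l :: ls, w :: ws, prev =>
      if w != prev && w != -100 then l :: goSel ls ws w else goSel ls ws w
  | _, _, _ => []

-- A's first loop, as a structural recursion on word_ids (prev generalized).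
def padRec (prev : Int) : List Int → List Int
  | [] => []
  | w :: ws => (if prev == w then -100 else w) :: padRec w ws

lemma padFold_eq (word_ids : List Int) : ∀ (prev : Int) (acc : List Int),
    (word_ids.foldl
      (fun (st : Int × List Int) word_id =>
        (word_id, st.2 ++ [if st.1 == word_id then -100 else word_id]))
      (prev, acc)).2 = acc ++ padRec prev word_ids := by
  induction word_ids with
  | nil => intro prev acc; simp [padRec]
  | cons w ws ih => intro prev acc; simp only [List.foldl_cons, padRec, ih]; simp

lemma aFold_eq : ∀ (pairs : List (Int × Int)) (acc : List Int),
    pairs.foldl (fun acc p => if p.2 != -100 then acc ++ [p.1] else acc) acc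
    = acc ++ pairs.foldl (fun acc p => if p.2 != -100 then acc ++ [p.1] else acc) [] := by
  intro pairs
  induction pairs with
  | nil => intro acc; simp
  | cons p ps ih =>
    intro acc
    simp only [List.foldl_cons]
    rw [ih]
    split
    · rw [show ([] : List Int) ++ [p.1] = [p.1] from rfl, ih [p.1]]; simp
    · rfl

-- A equals the recursive characterisation.
lemma a_eq_go : ∀ (labels word_ids : List Int) (prev : Int),
    (labels.zip (padRec prev word_ids)).foldl
      (fun acc p => if p.2 != -100 then acc ++ [p.1] else acc) []
    = goSel labels word_ids prev := by
  intro labels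
  induction labels with
  | nil => intro word_ids prev; cases word_ids <;> simp [padRec, goSel]
  | cons l ls ih =>
    intro word_ids prev
    cases word_ids with
    | nil => simp [padRec, goSel]
    | cons w ws =>
      simp only [padRec, List.zip_cons_cons, List.foldl_cons, goSel]
      rw [aFold_eq, ih]
      by_cases h1 : prev = w
      · simp [h1]
      · by_cases h2 : w = (-100 : Int) <;> simp [h1, h2, bne, Ne.symm h1]

-- B's index filter with a generalized "previous id" parameter.
def selIdx (labels ws : List Int) (prev : Int) : List Int :=
  ((List.range ws.length).filter (fun i =>
      ws.getD i 0 != -100 &&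
      (if i == 0 then ws.getD 0 0 != prev else ws.getD i 0 != ws.getD (i - 1) 0))).map
    (fun i => labels.getD i 0)

lemma selIdx_eq_go : ∀ (ws labels : List Int) (prev : Int),
    labels.length = ws.length → selIdx labels ws prev = goSel labels ws prev := by
  intro ws
  induction ws with
  | nil => intro labels prev h; cases labels <;> simp_all [selIdx, goSel]
  | cons w ws ih =>
    intro labels prev h
    cases labels with
    | nil => simp at h
    | cons l ls =>
      simp only [List.length_cons] at h
      have hlen : ls.length = ws.length := by omega
      unfold selIdx goSel
      rw [List.length_cons, List.range_succ_eq_map, List.filter_cons, List.filter_map]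
      have hshift :
          List.map (fun i => (l :: ls).getD i 0)
            (List.map Nat.succ ((List.range ws.length).filter
              ((fun i => (w :: ws).getD i 0 != -100 &&
                (if i == 0 then (w :: ws).getD 0 0 != prev
                 else (w :: ws).getD i 0 != (w :: ws).getD (i - 1) 0)) ∘ Nat.succ)))
          = selIdx ls ws w := by
        rw [List.map_map]
        unfold selIdx
        congr 1
        apply List.filter_congr
        intro i _
        simp only [Function.comp]
        cases i with
        | zero => simp
        | succ j => simp
      rw [apply_ite (List.map (fun i => (l :: ls).getD i 0)), List.map_cons, hshift,
          ih ls w hlen]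
      by_cases h1 : w = prev
      · by_cases h2 : w = (-100 : Int) <;> simp [h1, bne]
      · by_cases h2 : w = (-100 : Int) <;> simp [h1, h2, bne]

lemma alt_eq_selIdx (labels ws : List Int) :
    unalign_labels_by_word_ids_alt labels ws = selIdx labels ws (-100) := by
  unfold unalign_labels_by_word_ids_alt selIdx
  congr 1
  apply List.filter_congr
  intro i _
  cases i with
  | zero => simp [Bool.and_self]
  | succ j => simp

-- ===== VERDICT (by name: the statement is the Claim_ definition above) =====
theorem unalign_labels_by_word_ids_spec : Claim_equal_unalign_labels_by_word_ids := by
  intro labels word_ids _ hpre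
  show _ = _
  rw [alt_eq_selIdx, selIdx_eq_go word_ids labels (-100) hpre]
  unfold unalign_labels_by_word_ids
  simp only [padFold_eq, List.nil_append]
  exact a_eq_go labels word_ids (-100)
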